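-- pv_equiv track=rewrite | github.com/PaulMoritz/Secret-Sharing-in-Comparison | preconditions.py | supported_sequence
-- ===== SOURCE A (Python) =====
-- def supported_sequence(matrix):
--     for j, row in enumerate(matrix):
--         row_sequence_head = 0
--         in_one_sequence = False
--         max_sequence = 0
--         number_of_ones = 0
--         head = 0
--         for i, element in enumerate(row):
--             if element == 1:
--                 number_of_ones += 1
--                 if not in_one_sequence:
--                     in_one_sequence = True
--                     head = i
--                 if i == len(row) - 1:
--                     if number_of_ones > max_sequence:
--                         row_sequence_head = head
--                         max_sequence = number_of_ones
--             else:
--                 if in_one_sequence: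
--                     in_one_sequence = False
--                     if number_of_ones > max_sequence:
--                         row_sequence_head = head
--                         max_sequence = number_of_ones
--                 number_of_ones = 0
--         if max_sequence % 2:
--             if check_supported(matrix, j, row_sequence_head):
--                 return True
--     return False
--
-- def check_supported(matrix, j, i):
--     for row_num, row in enumerate(matrix):
--         if not row_num == j:
--             for index, element in enumerate(row):
--                 if index < i:
--                     if element == 1:
--                         return True
--     return False
-- ===== SOURCE B (Python) =====
-- def supported_sequence(matrix):
--     # first index of a 1 in each row (None if the row has no 1)
--     mins = []
--     for row in matrix:
--         m = None
--         for i, e in enumerate(row):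
--             if e == 1:
--                 m = i
--                 break
--         mins.append(m)
--     # smallest and second-smallest first-1 index over all rows, with their row numbers
--     best1 = None
--     best2 = None
--     for r, m in enumerate(mins):
--         if m is None:
--             continue
--         if best1 is None or m < best1[0]:
--             best2 = best1
--             best1 = (m, r)
--         elif best2 is None or m < best2[0]:
--             best2 = (m, r)
--     for j, row in enumerate(matrix):
--         length, head = _longest_run(row)
--         if length % 2 == 1:
--             if best1 is not None:
--                 if best1[1] != j:
--                     if best1[0] < head:
--                         return True
--                 elif best2 is not None and best2[0] < head:
--                     return True
--     return False
--
-- def _longest_run(row):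
--     best_len = 0
--     best_head = 0
--     cur = 0
--     for i, e in enumerate(row):
--         cur = cur + 1 if e == 1 else 0
--         if cur > best_len:
--             best_len = cur
--             best_head = i - cur + 1
--     return best_len, best_head
-- ===== Notes on version B (the rewrite author's own statement) =====
-- stated objective: alternative
-- what changed: B precomputes each row's first-1 index and the two smallest such indices once, replacing A's check_supported rescan of the whole matrix per odd-run row by a constant-time lookup, and finds each row's longest run with a plain incremental counter fold instead of A's run-flag state machine with a last-element special case.
import Mathlib
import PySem

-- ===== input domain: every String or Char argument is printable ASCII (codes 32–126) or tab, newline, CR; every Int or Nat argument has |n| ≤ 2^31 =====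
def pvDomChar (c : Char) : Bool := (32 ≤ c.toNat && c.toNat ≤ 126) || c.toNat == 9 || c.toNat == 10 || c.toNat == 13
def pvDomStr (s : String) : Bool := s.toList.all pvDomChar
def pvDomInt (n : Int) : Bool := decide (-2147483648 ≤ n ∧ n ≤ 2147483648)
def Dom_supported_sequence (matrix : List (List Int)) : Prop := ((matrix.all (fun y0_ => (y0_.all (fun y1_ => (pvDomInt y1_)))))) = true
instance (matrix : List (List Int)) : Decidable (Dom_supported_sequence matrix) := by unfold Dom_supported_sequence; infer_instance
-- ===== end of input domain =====

-- B replaces A's per-row rescan of the whole matrix (check_supported) by precomputed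
-- first-1 indices and their two smallest values looked up per row, and uses a plain
-- incremental longest-run fold instead of A's run-flag state machine; objective: alternative.

-- ===== PORT A =====

-- inner loop of check_supported (scan of one row)
def csInner : List Int → Nat → Nat → Bool
  | [], _, _ => false
  | e :: rest, idx, h =>
    if idx < h then
      if e = 1 then true else csInner rest (idx + 1) h
    else csInner rest (idx + 1) h

-- outer loop of check_supported
def csOuter : List (List Int) → Nat → Nat → Nat → Bool
  | [], _, _, _ => false
  | row :: rest, r, j, h =>
    if r = j then csOuter rest (r + 1) j h
    else if csInner row 0 h then true else csOuter rest (r + 1) j h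

def check_supported (matrix : List (List Int)) (j : Nat) (i : Nat) : Bool :=
  csOuter matrix 0 j i

-- inner loop of A over one row; state (rsh, inseq, maxs, ones, head); returns (maxs, rsh)
def aRow (n : Nat) : List Int → Nat → Nat → Bool → Nat → Nat → Nat → Nat × Nat
  | [], _, rsh, _, maxs, _, _ => (maxs, rsh)
  | e :: rest, i, rsh, inseq, maxs, ones, head =>
    if e = 1 then
      let ones' := ones + 1
      let head' := if !inseq then i else head
      if i = n - 1 then
        if ones' > maxs then aRow n rest (i + 1) head' true ones' ones' head'
        else aRow n rest (i + 1) rsh true maxs ones' head'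
      else aRow n rest (i + 1) rsh true maxs ones' head'
    else
      if inseq then
        if ones > maxs then aRow n rest (i + 1) head false ones 0 head
        else aRow n rest (i + 1) rsh false maxs 0 head
      else aRow n rest (i + 1) rsh false maxs 0 head

-- outer loop of A
def aOuter (matrix : List (List Int)) : List (List Int) → Nat → Bool
  | [], _ => false
  | row :: rest, j =>
    let p := aRow row.length row 0 0 false 0 0 0
    if p.1 % 2 = 1 then
      if check_supported matrix j p.2 then true else aOuter matrix rest (j + 1)
    else aOuter matrix rest (j + 1)

def supported_sequence (matrix : List (List Int)) : Bool :=
  aOuter matrix matrix 0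

-- ===== PORT B =====

-- first index of a 1 in a row (B's for/break loop)
def firstOne : List Int → Nat → Option Nat
  | [], _ => none
  | e :: rest, i => if e = 1 then some i else firstOne rest (i + 1)

-- B's best1/best2 scan over the list of first-1 indices
def bestTwo : List (Option Nat) → Nat → Option (Nat × Nat) → Option (Nat × Nat) →
    Option (Nat × Nat) × Option (Nat × Nat)
  | [], _, b1, b2 => (b1, b2)
  | none :: rest, r, b1, b2 => bestTwo rest (r + 1) b1 b2
  | some m :: rest, r, b1, b2 =>
    match b1 with
    | none => bestTwo rest (r + 1) (some (m, r)) b1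
    | some (v1, r1) =>
      if m < v1 then bestTwo rest (r + 1) (some (m, r)) (some (v1, r1))
      else
        match b2 with
        | none => bestTwo rest (r + 1) (some (v1, r1)) (some (m, r))
        | some (v2, r2) =>
          if m < v2 then bestTwo rest (r + 1) (some (v1, r1)) (some (m, r))
          else bestTwo rest (r + 1) (some (v1, r1)) (some (v2, r2))

-- B's _longest_run fold; state (best_len, best_head, cur); returns (best_len, best_head)
def bRow : List Int → Nat → Nat → Nat → Nat → Nat × Nat
  | [], _, bl, bh, _ => (bl, bh)
  | e :: rest, i, bl, bh, cur =>
    let cur' := if e = 1 then cur + 1 else 0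
    if cur' > bl then bRow rest (i + 1) cur' (i + 1 - cur') cur'
    else bRow rest (i + 1) bl bh cur'

-- B's O(1) replacement of check_supported, from best1/best2
def checkFast (b1 b2 : Option (Nat × Nat)) (j h : Nat) : Bool :=
  match b1 with
  | none => false
  | some (v1, r1) =>
    if r1 ≠ j then decide (v1 < h)
    else
      match b2 with
      | none => false
      | some (v2, _) => decide (v2 < h)

-- B's final loop over the rows
def bOuter (b1 b2 : Option (Nat × Nat)) : List (List Int) → Nat → Bool
  | [], _ => false
  | row :: rest, j =>
    let p := bRow row 0 0 0 0
    if p.1 % 2 = 1 then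
      if checkFast b1 b2 j p.2 then true else bOuter b1 b2 rest (j + 1)
    else bOuter b1 b2 rest (j + 1)

def supported_sequence_alt (matrix : List (List Int)) : Bool :=
  let mins := matrix.map (fun row => firstOne row 0)
  let p := bestTwo mins 0 none none
  bOuter p.1 p.2 matrix 0

-- ===== PRECONDITION & SPEC =====
def Spec_supported_sequence (matrix : List (List Int)) (out : Bool) : Prop := out = supported_sequence_alt matrix
instance (matrix : List (List Int)) (out : Bool) : Decidable (Spec_supported_sequence matrix out) := by unfold Spec_supported_sequence; infer_instance

-- ===== CLAIM (what is proved, stated in full; the proofs are below) =====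
def Claim_equal_supported_sequence : Prop := ∀ (matrix : List (List Int)), Dom_supported_sequence matrix → Spec_supported_sequence matrix (supported_sequence matrix)

-- ===== LEMMAS AND PROOFS =====

-- A's inner row loop equals B's incremental fold, via a state invariant.
theorem rowEq (n : Nat) : ∀ (rest : List Int) (i rsh maxs head bl bh cur : Nat) (inseq : Bool),
    i + rest.length = n →
    inseq = decide (0 < cur) →
    cur ≤ i →
    (0 < cur → head = i - cur) →
    (cur ≤ maxs → bl = maxs ∧ bh = rsh) →
    (maxs < cur → bl = cur ∧ bh = i - cur) →
    (i = n → cur ≤ maxs) →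
    aRow n rest i rsh inseq maxs cur head = bRow rest i bl bh cur := by
  intro rest
  induction rest with
  | nil =>
    intro i rsh maxs head bl bh cur inseq hlen hseq hci hhead hle hgt hend
    have hcm : cur ≤ maxs := hend (by simpa using hlen)
    obtain ⟨h1, h2⟩ := hle hcm
    simp [aRow, bRow, h1, h2]
  | cons e rest ih =>
    intro i rsh maxs head bl bh cur inseq hlen hseq hci hhead hle hgt hend
    subst hseq
    simp only [List.length_cons] at hlen
    by_cases he : e = 1
    · -- the element is a 1
      have hh' : (if !decide (0 < cur) then i else head) = i - cur := by
        by_cases hc0 : 0 < cur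
        · simp [hc0, hhead hc0]
        · have hcz : cur = 0 := by omega
          subst hcz; simp
      have hbb : cur + 1 > bl ↔ maxs < cur + 1 := by
        constructor
        · intro h1
          by_cases hcm : cur ≤ maxs
          · obtain ⟨e1, _⟩ := hle hcm; omega
          · omega
        · intro h1
          by_cases hcm : cur ≤ maxs
          · obtain ⟨e1, _⟩ := hle hcm; omega
          · obtain ⟨e1, _⟩ := hgt (by omega); omega
      by_cases hni : i = n - 1
      · have hrest : rest = [] := by
          cases rest with
          | nil => rfl
          | cons x xs => simp only [List.length_cons] at hlen; omega
        subst hrest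
        simp only [aRow, bRow, he, reduceIte, hh', if_pos hni]
        by_cases hm : cur + 1 > maxs
        · rw [if_pos hm, if_pos (hbb.mpr hm)]
          simp only [Prod.mk.injEq]
          exact ⟨trivial, by omega⟩
        · rw [if_neg hm, if_neg (fun h => hm (hbb.mp h))]
          simp only [Prod.mk.injEq]
          obtain ⟨h1, h2⟩ := hle (by omega)
          exact ⟨h1.symm, h2.symm⟩
      · simp only [aRow, bRow, he, reduceIte, hh', if_neg hni]
        by_cases hm : cur + 1 > maxs
        · rw [if_pos (hbb.mpr (by omega))]
          rw [show (true : Bool) = decide (0 < cur + 1) from (decide_eq_true (Nat.succ_pos cur)).symm]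
          apply ih
          · omega
          · rfl
          · omega
          · intro _; omega
          · intro h; omega
          · intro _; omega
          · intro hn; exfalso; apply hni; omega
        · rw [if_neg (fun h => hm (by omega))]
          rw [show (true : Bool) = decide (0 < cur + 1) from (decide_eq_true (Nat.succ_pos cur)).symm]
          apply ih
          · omega
          · rfl
          · omega
          · intro _; omega
          · intro h
            obtain ⟨h1, h2⟩ := hle (by omega)
            exact ⟨h1, h2⟩
          · intro h; omega
          · intro hn; exfalso; apply hni; omega
    · -- the element is not a 1
      simp only [aRow, bRow, he, reduceIte]
      have hb0 : ¬ ((0 : Nat) > bl) := by omega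
      rw [if_neg hb0]
      by_cases hc0 : 0 < cur
      · simp only [hc0, decide_true]
        by_cases hm : cur > maxs
        · rw [if_pos hm]
          obtain ⟨hbl, hbh⟩ := hgt hm
          rw [show (false : Bool) = decide (0 < 0) by simp]
          apply ih
          · omega
          · rfl
          · omega
          · intro h; omega
          · intro _
            refine ⟨hbl, ?_⟩
            rw [hbh, hhead hc0]
          · intro h; omega
          · intro _; omega
        · rw [if_neg hm]
          obtain ⟨hbl, hbh⟩ := hle (by omega)
          rw [show (false : Bool) = decide (0 < 0) by simp]
          apply ih
          · omega
          · rfl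
          · omega
          · intro h; omega
          · intro _; exact ⟨hbl, hbh⟩
          · intro h; omega
          · intro _; omega
      · have hcz : cur = 0 := by omega
        subst hcz
        simp only [if_neg (by simp : ¬ ((decide (0 < 0) : Bool) = true))]
        obtain ⟨hbl, hbh⟩ := hle (by omega)
        rw [show (false : Bool) = decide (0 < 0) by simp]
        apply ih
        · omega
        · rfl
        · omega
        · intro h; omega
        · intro _; exact ⟨hbl, hbh⟩
        · intro h; omega
        · intro _; omega

theorem rowEq_start (row : List Int) :
    aRow row.length row 0 0 false 0 0 0 = bRow row 0 0 0 0 := by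
  apply rowEq <;> simp

-- csInner never fires once the index has passed the bound
theorem csInner_ge : ∀ (row : List Int) (idx h : Nat), h ≤ idx → csInner row idx h = false := by
  intro row
  induction row with
  | nil => intro idx h _; simp [csInner]
  | cons e rest ih =>
    intro idx h hh
    simp only [csInner]
    rw [if_neg (by omega)]
    exact ih (idx + 1) h (by omega)

-- csInner answers "first 1 is before h"
theorem csInner_firstOne : ∀ (row : List Int) (idx h : Nat),
    csInner row idx h = (match firstOne row idx with
      | some m => decide (m < h)
      | none => false) := by
  intro row
  induction row with
  | nil => intro idx h; simp [csInner, firstOne]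
  | cons e rest ih =>
    intro idx h
    simp only [csInner, firstOne]
    by_cases he : e = 1
    · rw [if_pos he, if_pos he]
      by_cases hi : idx < h
      · simp [hi]
      · rw [if_neg hi]
        rw [csInner_ge rest (idx + 1) h (by omega)]
        simp [hi]
    · rw [if_neg he, if_neg he]
      by_cases hi : idx < h
      · rw [if_pos hi]; exact ih (idx + 1) h
      · rw [if_neg hi]; exact ih (idx + 1) h

-- proof-side reference answer over the list of first-1 indices
def specCheck : List (Option Nat) → Nat → Nat → Nat → Bool
  | [], _, _, _ => false
  | om :: rest, r, j, h =>
    ((!(r == j)) && (match om with | some m => decide (m < h) | none => false)) || specCheck rest (r + 1) j h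

theorem csOuter_spec : ∀ (rows : List (List Int)) (r j h : Nat),
    csOuter rows r j h = specCheck (rows.map (fun row => firstOne row 0)) r j h := by
  intro rows
  induction rows with
  | nil => intro r j h; simp [csOuter, specCheck]
  | cons row rest ih =>
    intro r j h
    simp only [csOuter, List.map, specCheck]
    rw [csInner_firstOne]
    by_cases hr : r = j
    · simp [hr, ih]
    · simp only [if_neg hr]
      cases hm : firstOne row 0 with
      | none => simp [ih]
      | some m =>
        by_cases hmh : m < h
        · simp [hr, hmh]
        · simp [hmh, ih]

-- coherence of the (best1, best2) state
def Coh (r : Nat) : Option (Nat × Nat) → Option (Nat × Nat) → Prop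
  | none, b2 => b2 = none
  | some (_, r1), none => r1 < r
  | some (v1, r1), some (v2, r2) => r1 < r ∧ r2 < r ∧ v1 ≤ v2 ∧ r1 ≠ r2

theorem coh_mono {r : Nat} {b1 b2 : Option (Nat × Nat)} (hc : Coh r b1 b2) : Coh (r + 1) b1 b2 := by
  rcases b1 with _ | ⟨v1, r1⟩ <;> rcases b2 with _ | ⟨v2, r2⟩ <;> simp_all [Coh] <;> omega

theorem bestTwo_f : ∀ (rest : List (Option Nat)) (r : Nat) (b1 b2 : Option (Nat × Nat)) (j h : Nat),
    Coh r b1 b2 →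
    checkFast (bestTwo rest r b1 b2).1 (bestTwo rest r b1 b2).2 j h =
      (checkFast b1 b2 j h || specCheck rest r j h) := by
  intro rest
  induction rest with
  | nil => intro r b1 b2 j h _; simp [bestTwo, specCheck]
  | cons om rest ih =>
    intro r b1 b2 j h hcoh
    cases om with
    | none =>
      simp only [bestTwo, specCheck]
      rw [ih (r + 1) b1 b2 j h (coh_mono hcoh)]
      simp
    | some m =>
      rcases b1 with _ | ⟨v1, r1⟩
      · have hb2 : b2 = none := hcoh
        subst hb2
        simp only [bestTwo, specCheck]
        rw [ih (r + 1) (some (m, r)) none j h (by simp [Coh])]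
        cases hB : specCheck rest (r + 1) j h <;> by_cases hj : r = j <;>
          by_cases hmh : m < h <;> simp [checkFast, hj, hmh]
      · rcases b2 with _ | ⟨v2, r2⟩
        · have hr1 : r1 < r := hcoh
          simp only [bestTwo, specCheck]
          by_cases hm1 : m < v1
          · rw [if_pos hm1]
            rw [ih (r + 1) (some (m, r)) (some (v1, r1)) j h
                (by simp [Coh]; omega)]
            cases hB : specCheck rest (r + 1) j h <;> by_cases hj : r = j <;>
              by_cases hj1 : r1 = j <;> by_cases hmh : m < h <;> by_cases h1h : v1 < h <;>
              simp [checkFast, hj, hj1, hmh, h1h] <;> omega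
          · rw [if_neg hm1]
            rw [ih (r + 1) (some (v1, r1)) (some (m, r)) j h
                (by simp [Coh]; omega)]
            cases hB : specCheck rest (r + 1) j h <;> by_cases hj : r = j <;>
              by_cases hj1 : r1 = j <;> by_cases hmh : m < h <;> by_cases h1h : v1 < h <;>
              simp [checkFast, hj, hj1, hmh, h1h] <;> omega
        · obtain ⟨hr1, hr2, hv12, hne⟩ := hcoh
          simp only [bestTwo, specCheck]
          by_cases hm1 : m < v1
          · rw [if_pos hm1]
            rw [ih (r + 1) (some (m, r)) (some (v1, r1)) j h
                (by simp [Coh]; omega)]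
            cases hB : specCheck rest (r + 1) j h <;> by_cases hj : r = j <;>
              by_cases hj1 : r1 = j <;> by_cases hj2 : r2 = j <;> by_cases hmh : m < h <;>
              by_cases h1h : v1 < h <;> by_cases h2h : v2 < h <;>
              simp [checkFast, hj, hj1, hj2, hmh, h1h, h2h] <;> omega
          · rw [if_neg hm1]
            by_cases hm2 : m < v2
            · rw [if_pos hm2]
              rw [ih (r + 1) (some (v1, r1)) (some (m, r)) j h
                  (by simp [Coh]; omega)]
              cases hB : specCheck rest (r + 1) j h <;> by_cases hj : r = j <;>
                by_cases hj1 : r1 = j <;> by_cases hj2 : r2 = j <;> by_cases hmh : m < h <;>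
                by_cases h1h : v1 < h <;> by_cases h2h : v2 < h <;>
                simp [checkFast, hj, hj1, hj2, hmh, h1h, h2h] <;> omega
            · rw [if_neg hm2]
              rw [ih (r + 1) (some (v1, r1)) (some (v2, r2)) j h
                  (by simp [Coh]; omega)]
              cases hB : specCheck rest (r + 1) j h <;> by_cases hj : r = j <;>
                by_cases hj1 : r1 = j <;> by_cases hj2 : r2 = j <;> by_cases hmh : m < h <;>
                by_cases h1h : v1 < h <;> by_cases h2h : v2 < h <;>
                simp [checkFast, hj, hj1, hj2, hmh, h1h, h2h] <;> omega

-- the two outer loops agree row by row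
theorem outerEq (matrix : List (List Int)) :
    ∀ (rows : List (List Int)) (j : Nat),
    aOuter matrix rows j =
      bOuter (bestTwo (matrix.map (fun row => firstOne row 0)) 0 none none).1
             (bestTwo (matrix.map (fun row => firstOne row 0)) 0 none none).2 rows j := by
  intro rows
  induction rows with
  | nil => intro j; simp [aOuter, bOuter]
  | cons row rest ih =>
    intro j
    simp only [aOuter, bOuter, rowEq_start]
    have hchk : check_supported matrix j (bRow row 0 0 0 0).2 =
        checkFast (bestTwo (matrix.map (fun row => firstOne row 0)) 0 none none).1
                  (bestTwo (matrix.map (fun row => firstOne row 0)) 0 none none).2 j (bRow row 0 0 0 0).2 := by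
      rw [check_supported, csOuter_spec]
      rw [bestTwo_f _ 0 none none j _ (by simp [Coh])]
      simp [checkFast]
    rw [hchk, ih]

-- ===== VERDICT (by name: the statement is the Claim_ definition above) =====
theorem supported_sequence_spec : Claim_equal_supported_sequence := by
  intro matrix _
  unfold Spec_supported_sequence supported_sequence supported_sequence_alt
  exact outerEq matrix matrix 0
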